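-- pv_equiv track=rewrite | github.com/emalbanozai-code/ExamProject | backend/staff/migrations/0004_backfill_staff_and_trainer_codes.py | _build_code
-- ===== SOURCE A (Python) =====
-- def _build_code(prefix, used_codes):
--     next_number = 1
--     while True:
--         candidate = f"{prefix}-{next_number:06d}"
--         if candidate not in used_codes:
--             used_codes.add(candidate)
--             return candidate
--         next_number += 1
-- ===== SOURCE B (Python) =====
-- def _build_code(prefix, used_codes):
--     head = prefix + "-"
--     ns = []
--     for code in used_codes:
--         if code.startswith(head):
--             rest = code[len(head):]
--             if len(rest) >= 6 and rest.isdigit() and (len(rest) == 6 or rest[0] != "0"):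
--                 ns.append(int(rest))
--     ns.sort()
--     expected = 1
--     for v in ns:
--         if v == expected:
--             expected += 1
--     candidate = f"{prefix}-{expected:06d}"
--     used_codes.add(candidate)
--     return candidate
-- ===== Notes on version B (the rewrite author's own statement) =====
-- stated objective: alternative
-- what changed: Instead of probing candidate codes 1,2,3,... against the set until one is free, B makes one pass over used_codes parsing each code back into its number (exact reconstruction: prefix, dash, >=6 digits, no non-canonical padding), sorts the numbers, and walks them with an expected counter to find the smallest unused number directly.
import Mathlib
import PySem

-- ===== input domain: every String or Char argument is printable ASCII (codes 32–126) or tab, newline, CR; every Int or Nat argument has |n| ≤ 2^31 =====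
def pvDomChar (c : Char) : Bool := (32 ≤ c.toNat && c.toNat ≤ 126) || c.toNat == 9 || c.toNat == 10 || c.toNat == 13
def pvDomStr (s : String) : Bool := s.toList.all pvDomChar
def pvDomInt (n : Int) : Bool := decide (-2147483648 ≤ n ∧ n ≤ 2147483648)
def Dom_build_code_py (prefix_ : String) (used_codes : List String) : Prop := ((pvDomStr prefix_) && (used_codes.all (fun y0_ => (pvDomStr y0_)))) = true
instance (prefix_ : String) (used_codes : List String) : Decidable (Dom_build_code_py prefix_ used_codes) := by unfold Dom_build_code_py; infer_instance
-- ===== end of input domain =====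

-- B replaces A's probe-candidates-one-by-one loop by a parse/sort/scan pass over the stored
-- codes (an 'alternative' decomposition). Both Pythons add the returned code to the
-- `used_codes` set in place; the theorems here are about the RETURN value only.

-- ===== PORT A =====
-- shared format helper: f"{prefix}-{n:06d}" for n ≥ 0 (exact: decimal digits of n,
-- zero-padded on the left to width 6)
def natChars (n : Nat) : List Char :=
  ((Nat.digits 10 n).map (fun d => Char.ofNat (d + 48))).reverse

def fmtCode (prefix_ : String) (n : Nat) : String :=
  String.ofList (prefix_.toList ++ '-' :: (List.replicate (6 - (natChars n).length) '0' ++ natChars n))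

-- A's `while True` loop; the fuel `used_codes.length + 1` only makes the same computation
-- total (lemma `buildLoop_eq` below shows it is never exhausted)
def buildLoop (prefix_ : String) (used_codes : List String) : Nat → Nat → String
  | 0, n => fmtCode prefix_ n
  | fuel + 1, n =>
      if fmtCode prefix_ n ∈ used_codes then buildLoop prefix_ used_codes fuel (n + 1)
      else fmtCode prefix_ n

def build_code_py (prefix_ : String) (used_codes : List String) : String :=
  buildLoop prefix_ used_codes (used_codes.length + 1) 1

-- ===== PORT B =====
def digitVal (c : Char) : Nat := c.toNat - 48

-- Source B's inner acceptance test: len(rest) >= 6 and rest.isdigit() and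
-- (len(rest) == 6 or rest[0] != "0"), value int(rest)
def pvCheckRest (rest : List Char) : Option Nat :=
  if 6 ≤ rest.length ∧ rest.all PySem.Chars.isdigit ∧
      (rest.length = 6 ∨ rest.head? ≠ some '0') then
    some (rest.foldl (fun a c => a * 10 + digitVal c) 0)
  else none

-- `code.startswith(head)` then the slice `code[len(head):]`
def extractNum (head : List Char) (code : String) : Option Nat :=
  if head.isPrefixOf code.toList then pvCheckRest (code.toList.drop head.length)
  else none

def build_code_py_alt (prefix_ : String) (used_codes : List String) : String :=
  let head := prefix_.toList ++ ['-']
  let ns := used_codes.filterMap (extractNum head)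
  let sortedNs := PySem.List.sorted ns (fun x => x) false
  let expected := sortedNs.foldl (fun e v => if v = e then e + 1 else e) 1
  fmtCode prefix_ expected

-- ===== PRECONDITION & SPEC =====
def Spec_build_code_py (prefix_ : String) (used_codes : List String) (out : String) : Prop := out = build_code_py_alt prefix_ used_codes
instance (prefix_ : String) (used_codes : List String) (out : String) : Decidable (Spec_build_code_py prefix_ used_codes out) := by unfold Spec_build_code_py; infer_instance

-- ===== CLAIM (what is proved, stated in full; the proofs are below) =====
def Claim_equal_build_code_py : Prop := ∀ (prefix_ : String) (used_codes : List String), Dom_build_code_py prefix_ used_codes → Spec_build_code_py prefix_ used_codes (build_code_py prefix_ used_codes)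

-- ===== LEMMAS AND PROOFS =====

-- digit-character arithmetic
theorem toNat_ofNat_small {m : Nat} (h : m < 55296) : (Char.ofNat m).toNat = m := by
  rw [Char.toNat_ofNat, if_pos (Or.inl h : Nat.isValidChar m)]

theorem isdigit_bounds {c : Char} (hc : PySem.Chars.isdigit c = true) :
    48 ≤ c.toNat ∧ c.toNat ≤ 57 := by
  simp only [PySem.Chars.isdigit, Bool.and_eq_true, decide_eq_true_eq] at hc
  obtain ⟨h1, h2⟩ := hc
  rw [Char.le_def] at h1 h2
  have h1' : ('0' : Char).toNat ≤ c.toNat := UInt32.le_iff_toNat_le.mp h1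
  have h2' : c.toNat ≤ ('9' : Char).toNat := UInt32.le_iff_toNat_le.mp h2
  rw [show ('0' : Char).toNat = 48 from rfl] at h1'
  rw [show ('9' : Char).toNat = 57 from rfl] at h2'
  exact ⟨h1', h2'⟩

theorem digit_chr_isdigit {d : Nat} (hd : d < 10) :
    PySem.Chars.isdigit (Char.ofNat (d + 48)) = true := by
  interval_cases d <;> decide

theorem digit_chr_val {d : Nat} (hd : d < 10) : digitVal (Char.ofNat (d + 48)) = d := by
  interval_cases d <;> decide

theorem digit_val_lt {c : Char} (hc : PySem.Chars.isdigit c = true) : digitVal c < 10 := by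
  have := isdigit_bounds hc
  rw [digitVal]
  omega

theorem digit_chr_of_val {c : Char} (hc : PySem.Chars.isdigit c = true) :
    Char.ofNat (digitVal c + 48) = c := by
  have hb := isdigit_bounds hc
  have : digitVal c + 48 = c.toNat := by rw [digitVal]; omega
  rw [this]
  exact Char.ofNat_toNat c

-- Horner evaluation of a big-endian digit-char list
theorem foldl_digit_chars (L : List Nat) (a : Nat) (hL : ∀ d ∈ L, d < 10) :
    ((L.map (fun d => Char.ofNat (d + 48))).reverse).foldl (fun a c => a * 10 + digitVal c) a
      = a * 10 ^ L.length + Nat.ofDigits 10 L := by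
  induction L generalizing a with
  | nil => simp
  | cons d L ih =>
    have hd : d < 10 := hL d (by simp)
    have hL' : ∀ x ∈ L, x < 10 := fun x hx => hL x (List.mem_cons_of_mem _ hx)
    rw [List.map_cons, List.reverse_cons, List.foldl_append, ih a hL']
    simp only [List.foldl_cons, List.foldl_nil, digit_chr_val hd, List.length_cons,
      Nat.ofDigits_cons, pow_succ]
    ring

theorem natChars_digits : ∀ n, ∀ c ∈ natChars n, PySem.Chars.isdigit c = true := by
  intro n c hc
  simp only [natChars, List.mem_reverse, List.mem_map] at hc
  obtain ⟨d, hd, rfl⟩ := hc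
  exact digit_chr_isdigit (Nat.digits_lt_base (by norm_num) hd)

theorem foldl_natChars (n : Nat) :
    (natChars n).foldl (fun a c => a * 10 + digitVal c) 0 = n := by
  simpa [natChars, Nat.ofDigits_digits] using
    foldl_digit_chars (Nat.digits 10 n) 0 (fun d hd => Nat.digits_lt_base (by norm_num) hd)

theorem foldl_zeros (k : Nat) :
    (List.replicate k '0').foldl (fun a c => a * 10 + digitVal c) 0 = 0 := by
  induction k with
  | zero => rfl
  | succ k ih => simpa [List.replicate_succ, digitVal] using ih

theorem foldl_all_zero (l : List Char) (h : ∀ c ∈ l, c = '0') :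
    l.foldl (fun a c => a * 10 + digitVal c) 0 = 0 := by
  induction l with
  | nil => rfl
  | cons c t ih =>
    have hc : c = '0' := h c (by simp)
    simpa [hc, digitVal] using ih (fun x hx => h x (List.mem_cons_of_mem _ hx))

def pad6 (n : Nat) : List Char := List.replicate (6 - (natChars n).length) '0' ++ natChars n

theorem fmtCode_toList (prefix_ : String) (n : Nat) :
    (fmtCode prefix_ n).toList = (prefix_.toList ++ ['-']) ++ pad6 n := by
  simp [fmtCode, pad6]

theorem natChars_head_ne_zero (n : Nat) (h : natChars n ≠ []) : (natChars n).head? ≠ some '0' := by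
  have h1 : Nat.digits 10 n ≠ [] := by
    intro hnil; apply h; simp [natChars, hnil]
  have hn0 : n ≠ 0 := by
    intro h0; rw [h0] at h1; simp at h1
  have hd := Nat.getLast_digit_ne_zero 10 hn0
  rw [natChars, List.head?_reverse, List.getLast?_map, List.getLast?_eq_some_getLast h1]
  simp only [Option.map_some, ne_eq, Option.some.injEq]
  intro hc
  have hlt : (Nat.digits 10 n).getLast h1 < 10 :=
    Nat.digits_lt_base (by norm_num) (List.getLast_mem h1)
  have h2 := congrArg Char.toNat hc
  rw [toNat_ofNat_small (by omega)] at h2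
  rw [show ('0' : Char).toNat = 48 from rfl] at h2
  exact hd (by omega)

-- pad6 n satisfies exactly B's acceptance conditions and evaluates back to n
theorem pad6_spec (n : Nat) :
    6 ≤ (pad6 n).length ∧ (pad6 n).all PySem.Chars.isdigit = true ∧
      ((pad6 n).length = 6 ∨ (pad6 n).head? ≠ some '0') ∧
      (pad6 n).foldl (fun a c => a * 10 + digitVal c) 0 = n := by
  refine ⟨?_, ?_, ?_, ?_⟩
  · simp [pad6]; omega
  · simp only [pad6, List.all_append, Bool.and_eq_true, List.all_eq_true]
    constructor
    · intro c hc; rw [List.eq_of_mem_replicate hc]; decide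
    · exact natChars_digits n
  · by_cases h6 : (natChars n).length ≤ 6
    · left; simp [pad6]; omega
    · right
      have hrep : 6 - (natChars n).length = 0 := by omega
      have hne : natChars n ≠ [] := by
        intro hnil; rw [hnil] at h6; simp at h6
      simpa [pad6, hrep] using natChars_head_ne_zero n hne
  · rw [pad6, List.foldl_append, foldl_zeros, foldl_natChars]

theorem extractNum_fmt (prefix_ : String) (n : Nat) :
    extractNum (prefix_.toList ++ ['-']) (fmtCode prefix_ n) = some n := by
  obtain ⟨h1, h2, h3, h4⟩ := pad6_spec n
  rw [extractNum]
  simp only [fmtCode_toList]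
  rw [if_pos (List.isPrefixOf_iff_prefix.mpr ⟨pad6 n, rfl⟩)]
  rw [List.drop_left, pvCheckRest]
  rw [if_pos ⟨h1, h2, h3⟩, h4]

theorem dropWhile_cons_head {p : Char → Bool} {l : List Char} {c : Char} {cs : List Char}
    (h : l.dropWhile p = c :: cs) : p c = false := by
  induction l with
  | nil => simp at h
  | cons a t ih =>
    rw [List.dropWhile_cons] at h
    by_cases hp : p a
    · exact ih (by simpa [hp] using h)
    · rw [if_neg hp] at h
      obtain ⟨rfl, -⟩ : a = c ∧ t = cs := by injection h with h1 h2; exact ⟨h1, h2⟩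
      simpa using hp

theorem replicate_head_append (z : Nat) (core : List Char) (hz : 0 < z) :
    (List.replicate z '0' ++ core).head? = some '0' := by
  cases z with
  | zero => omega
  | succ z => simp [List.replicate_succ]

-- everything B accepts is a canonically zero-padded decimal: pad6 ∘ value = id
theorem pad6_roundtrip (rest : List Char) (hlen : 6 ≤ rest.length)
    (hdig : ∀ c ∈ rest, PySem.Chars.isdigit c = true)
    (hlead : rest.length = 6 ∨ rest.head? ≠ some '0') :
    pad6 (rest.foldl (fun a c => a * 10 + digitVal c) 0) = rest := by
  have hsplit : List.replicate (rest.takeWhile (· == '0')).length '0'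
      ++ rest.dropWhile (· == '0') = rest := by
    conv_rhs => rw [← List.takeWhile_append_dropWhile (p := (· == '0')) (l := rest)]
    congr 1
    exact (List.eq_replicate_of_mem (fun b hb => beq_iff_eq.mp (List.mem_takeWhile_imp (p := (· == '0')) hb))).symm
  cases hC : rest.dropWhile (· == '0') with
  | nil =>
    -- rest is all zeros: value 0, and the leading-zero rule forces length 6
    have h0 : ∀ c ∈ rest, c = '0' := by
      intro b hb
      rw [← List.takeWhile_append_dropWhile (p := (· == '0')) (l := rest), hC] at hb
      exact beq_iff_eq.mp (List.mem_takeWhile_imp (p := (· == '0')) (by simpa using hb))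
    have hval : rest.foldl (fun a c => a * 10 + digitVal c) 0 = 0 := foldl_all_zero rest h0
    have hrep : rest = List.replicate rest.length '0' := List.eq_replicate_of_mem h0
    have hh : rest.head? = some '0' := by
      cases hr : rest with
      | nil => rw [hr] at hlen; simp at hlen
      | cons a t =>
        have : a = '0' := h0 a (by rw [hr]; simp)
        simp [this]
    have h6 : rest.length = 6 := hlead.resolve_right (fun hn => hn hh)
    rw [hval]
    have hp0 : pad6 0 = List.replicate 6 '0' := by simp [pad6, natChars]
    rw [hp0]
    conv_rhs => rw [hrep, h6]
  | cons c0 cs =>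
    have hc0' : c0 ≠ '0' := by simpa using dropWhile_cons_head hC
    rw [hC] at hsplit
    have hcdig : ∀ c ∈ c0 :: cs, PySem.Chars.isdigit c = true := by
      intro c hc
      exact hdig c (List.dropWhile_subset _ (hC ▸ hc))
    have hval : rest.foldl (fun a c => a * 10 + digitVal c) 0
        = (c0 :: cs).foldl (fun a c => a * 10 + digitVal c) 0 := by
      conv_lhs => rw [← hsplit]
      rw [List.foldl_append, foldl_zeros]
    have hLd : ∀ d ∈ ((c0 :: cs).map digitVal).reverse, d < 10 := by
      intro d hd
      simp only [List.mem_reverse, List.mem_map] at hd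
      obtain ⟨c, hc, rfl⟩ := hd
      exact digit_val_lt (hcdig c hc)
    have hmapchr : ((((c0 :: cs).map digitVal).reverse).map (fun d => Char.ofNat (d + 48))).reverse
        = c0 :: cs := by
      rw [List.map_reverse, List.reverse_reverse, List.map_map]
      calc (c0 :: cs).map ((fun d => Char.ofNat (d + 48)) ∘ digitVal)
          = (c0 :: cs).map id := List.map_congr_left (fun c hc => digit_chr_of_val (hcdig c hc))
        _ = c0 :: cs := List.map_id _
    have hnval : (c0 :: cs).foldl (fun a c => a * 10 + digitVal c) 0
        = Nat.ofDigits 10 (((c0 :: cs).map digitVal).reverse) := by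
      have h' := foldl_digit_chars (((c0 :: cs).map digitVal).reverse) 0 hLd
      rw [hmapchr] at h'
      simpa using h'
    have hlast : ∀ (hne : ((c0 :: cs).map digitVal).reverse ≠ []),
        (((c0 :: cs).map digitVal).reverse).getLast hne ≠ 0 := by
      intro hne h0
      have h1 : (((c0 :: cs).map digitVal).reverse).getLast? = some (digitVal c0) := by
        rw [List.getLast?_reverse]; simp
      rw [List.getLast?_eq_some_getLast hne, h0] at h1
      have hd0 : digitVal c0 = 0 := by simpa using h1.symm
      apply hc0'
      have := digit_chr_of_val (hcdig c0 (by simp))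
      rw [hd0] at this
      rw [← this]
    have hncore : natChars ((c0 :: cs).foldl (fun a c => a * 10 + digitVal c) 0) = c0 :: cs := by
      rw [natChars, hnval, Nat.digits_ofDigits 10 (by norm_num) _ hLd hlast, hmapchr]
    rw [hval, pad6, hncore]
    by_cases hz : (rest.takeWhile (· == '0')).length = 0
    · have hco : rest = c0 :: cs := by rw [← hsplit, hz]; simp
      have hclen : 6 ≤ (c0 :: cs).length := by rw [← hco]; exact hlen
      have : 6 - (c0 :: cs).length = 0 := by omega
      rw [this]
      simp [hco]
    · have hhead : rest.head? = some '0' := by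
        rw [← hsplit]
        exact replicate_head_append _ _ (by omega)
      have hlen6 : rest.length = 6 := by
        rcases hlead with h | h
        · exact h
        · exact absurd hhead h
      have hlensum : rest.length = (rest.takeWhile (· == '0')).length + (c0 :: cs).length := by
        conv_lhs => rw [← hsplit]
        simp
      rw [← hsplit]
      congr 2
      omega

theorem extractNum_eq_some (prefix_ : String) (code : String) (n : Nat)
    (h : extractNum (prefix_.toList ++ ['-']) code = some n) :
    code = fmtCode prefix_ n := by
  rw [extractNum] at h
  by_cases hpre : (prefix_.toList ++ ['-']).isPrefixOf code.toList
  · rw [if_pos hpre] at h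
    obtain ⟨tail, htail⟩ := List.isPrefixOf_iff_prefix.mp hpre
    have hdt : code.toList.drop (prefix_.toList ++ ['-']).length = tail := by
      rw [← htail, List.drop_left]
    rw [hdt, pvCheckRest] at h
    by_cases hcond : 6 ≤ tail.length ∧ tail.all PySem.Chars.isdigit = true ∧
        (tail.length = 6 ∨ tail.head? ≠ some '0')
    · rw [if_pos hcond] at h
      obtain ⟨hlen, hdig, hlead⟩ := hcond
      have hn : n = tail.foldl (fun a c => a * 10 + digitVal c) 0 := (Option.some_inj.mp h).symm
      have hpad := pad6_roundtrip tail hlen (List.all_eq_true.mp hdig) hlead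
      apply String.toList_inj.mp
      rw [fmtCode_toList, hn, hpad]
      exact htail.symm
    · rw [if_neg hcond] at h; exact absurd h (by simp)
  · rw [if_neg hpre] at h; exact absurd h (by simp)

-- membership bridge: n occurs among the extracted numbers iff its code is stored
theorem mem_extracted_iff (prefix_ : String) (used_codes : List String) (n : Nat) :
    n ∈ used_codes.filterMap (extractNum (prefix_.toList ++ ['-']))
      ↔ fmtCode prefix_ n ∈ used_codes := by
  rw [List.mem_filterMap]
  constructor
  · rintro ⟨c, hc, hx⟩
    rwa [extractNum_eq_some prefix_ c n hx] at hc
  · intro h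
    exact ⟨fmtCode prefix_ n, h, extractNum_fmt prefix_ n⟩

-- B's counter walk over a ≤-sorted list computes the least value ≥ e missing from it
theorem foldMex_spec (l : List Nat) (e : Nat) (hs : l.Pairwise (· ≤ ·)) :
    e ≤ l.foldl (fun e v => if v = e then e + 1 else e) e ∧
    l.foldl (fun e v => if v = e then e + 1 else e) e ∉ l ∧
    ∀ m, e ≤ m → m < l.foldl (fun e v => if v = e then e + 1 else e) e → m ∈ l := by
  induction l generalizing e with
  | nil =>
    simp only [List.foldl_nil]
    exact ⟨le_rfl, by simp, fun m hm hlt => by omega⟩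
  | cons v t ih =>
    have ht : t.Pairwise (· ≤ ·) := hs.of_cons
    have hv : ∀ x ∈ t, v ≤ x := (List.pairwise_cons.mp hs).1
    simp only [List.foldl_cons]
    by_cases hev : v = e
    · subst hev
      rw [if_pos rfl]
      obtain ⟨h1, h2, h3⟩ := ih (v + 1) ht
      refine ⟨by omega, ?_, ?_⟩
      · simp only [List.mem_cons, not_or]
        exact ⟨by omega, h2⟩
      · intro m hm hlt
        rcases Nat.eq_or_lt_of_le hm with h | h
        · simp [← h]
        · exact List.mem_cons_of_mem _ (h3 m h hlt)
    · rw [if_neg hev]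
      obtain ⟨h1, h2, h3⟩ := ih e ht
      by_cases hlt : v < e
      · refine ⟨h1, ?_, fun m hm hl => List.mem_cons_of_mem _ (h3 m hm hl)⟩
        simp only [List.mem_cons, not_or]
        exact ⟨by omega, h2⟩
      · -- v > e: the fold stays at e
        have hvgt : e < v := by omega
        have heq : t.foldl (fun e v => if v = e then e + 1 else e) e = e := by
          by_contra hne
          have hgt : e < t.foldl (fun e v => if v = e then e + 1 else e) e := by omega
          have hin := h3 e le_rfl hgt
          have := hv e hin
          omega
        rw [heq]
        refine ⟨le_rfl, ?_, fun m hm hl => absurd hl (by omega)⟩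
        simp only [List.mem_cons, not_or]
        refine ⟨by omega, fun he => ?_⟩
        have := hv e he
        omega

-- A's loop returns the least candidate not in used_codes, given enough fuel
theorem buildLoop_eq (prefix_ : String) (used_codes : List String) :
    ∀ fuel n m, n ≤ m → m - n < fuel →
      (∀ k, n ≤ k → k < m → fmtCode prefix_ k ∈ used_codes) →
      fmtCode prefix_ m ∉ used_codes →
      buildLoop prefix_ used_codes fuel n = fmtCode prefix_ m := by
  intro fuel
  induction fuel with
  | zero => intro n m h1 h2; omega
  | succ f ih =>
    intro n m h1 h2 h3 h4
    rw [buildLoop]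
    by_cases hmem : fmtCode prefix_ n ∈ used_codes
    · rw [if_pos hmem]
      have hne : n ≠ m := by rintro rfl; exact h4 hmem
      exact ih (n + 1) m (by omega) (by omega) (fun k hk1 hk2 => h3 k (by omega) hk2) h4
    · rw [if_neg hmem]
      have : n = m := by
        by_contra hne
        exact hmem (h3 n le_rfl (by omega))
      rw [this]

-- ===== VERDICT (by name: the statement is the Claim_ definition above) =====
theorem build_code_py_spec : Claim_equal_build_code_py := by
  intro prefix_ used_codes _
  unfold Spec_build_code_py
  set S := used_codes.filterMap (extractNum (prefix_.toList ++ ['-'])) with hS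
  set L := PySem.List.sorted S (fun x => x) false with hL
  set E := L.foldl (fun e v => if v = e then e + 1 else e) 1 with hE
  have hpw : L.Pairwise (· ≤ ·) := PySem.List.sorted_pairwise S (fun x => x)
  obtain ⟨hE1, hEnot, hEmid⟩ := foldMex_spec L 1 hpw
  have hmemL : ∀ m, m ∈ L ↔ m ∈ S := fun m => PySem.List.mem_sorted S _ _ m
  -- fuel bound: the values 1..E-1 are distinct members of S, so E ≤ |S| + 1 ≤ |used| + 1
  have hfuel : E - 1 ≤ used_codes.length := by
    have hsub : List.range' 1 (E - 1) ⊆ S := by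
      intro k hk
      rw [List.mem_range'_1] at hk
      exact (hmemL k).mp (hEmid k (by omega) (by omega))
    have hnd : (List.range' 1 (E - 1)).Nodup := List.nodup_range'
    have h1 := (List.subperm_of_subset hnd hsub).length_le
    have h2 := List.length_filterMap_le (extractNum (prefix_.toList ++ ['-'])) used_codes
    rw [List.length_range'] at h1
    rw [← hS] at h2
    omega
  have halt : build_code_py_alt prefix_ used_codes = fmtCode prefix_ E := rfl
  rw [halt]
  unfold build_code_py
  apply buildLoop_eq prefix_ used_codes (used_codes.length + 1) 1 E hE1 (by omega)
  · intro k hk1 hk2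
    exact (mem_extracted_iff prefix_ used_codes k).mp ((hmemL k).mp (hEmid k hk1 hk2))
  · intro hmem
    exact hEnot ((hmemL E).mpr ((mem_extracted_iff prefix_ used_codes E).mpr hmem))
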